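-- pv_equiv track=rewrite | github.com/ElenaKochetkova1711/2.1- | test.py | is_cyclic_shift
-- ===== SOURCE A (Python) =====
-- def is_cyclic_shift(s, t):
--     if len(s) != len(t):
--         return -1
--
--     if s == t:
--         return 0
--
--     double_s = s + s
--
--     def build_prefix(pattern):
--         n = len(pattern)
--         prefix = [0] * n
--         j = 0
--         for i in range(1, n):
--             while j > 0 and pattern[i] != pattern[j]:
--                 j = prefix[j - 1]
--             if pattern[i] == pattern[j]:
--                 j += 1
--             prefix[i] = j
--         return prefix
--
--     def kmp_search(text, pattern):
--         if not pattern: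
--             return []
--
--         prefix = build_prefix(pattern)
--         result = []
--         j = 0
--
--         for i in range(len(text)):
--             while j > 0 and text[i] != pattern[j]:
--                 j = prefix[j - 1]
--             if text[i] == pattern[j]:
--                 j += 1
--             if j == len(pattern):
--                 result.append(i - len(pattern) + 1)
--                 j = prefix[j - 1]
--
--         return result
--
--     positions = kmp_search(double_s, t)
--
--     if not positions:
--         return -1
--
--     min_shift = len(s)
--     for pos in positions:
--         if pos < len(s):
--             shift = (len(s) - pos) % len(s)
--             min_shift = min(min_shift, shift)
--
--     return min_shift
-- ===== SOURCE B (Python) =====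
-- def is_cyclic_shift(s, t):
--     if len(s) != len(t):
--         return -1
--     if s == t:
--         return 0
--     n = len(s)
--     for r in range(1, n):
--         if s[n - r:] + s[:n - r] == t:
--             return r
--     return -1
-- ===== Notes on version B (the rewrite author's own statement) =====
-- stated objective: simpler
-- what changed: Replaced KMP on the doubled string plus a min-over-matches pass by a direct loop that tests each right-rotation amount r = 1..n-1 and returns the first match.
import Mathlib
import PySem

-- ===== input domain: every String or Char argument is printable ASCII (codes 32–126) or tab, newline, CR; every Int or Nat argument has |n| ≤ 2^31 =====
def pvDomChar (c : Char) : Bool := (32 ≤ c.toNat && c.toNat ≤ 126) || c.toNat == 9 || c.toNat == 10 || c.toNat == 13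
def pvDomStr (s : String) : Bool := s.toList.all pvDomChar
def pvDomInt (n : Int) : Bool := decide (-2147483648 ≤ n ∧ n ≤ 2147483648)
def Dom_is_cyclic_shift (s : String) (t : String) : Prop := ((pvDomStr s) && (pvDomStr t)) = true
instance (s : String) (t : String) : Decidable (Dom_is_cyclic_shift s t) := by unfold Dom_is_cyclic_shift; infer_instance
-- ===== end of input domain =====

-- B replaces A's KMP-on-the-doubled-string (plus a min-over-matches pass) by a direct loop that
-- tests each right-rotation amount r = 1..n-1 and returns the first match; objective: simpler.

-- ===== PORT A =====
-- the inner `while j > 0 and x != pattern[j]: j = prefix[j-1]` loop of A; the fuel argument makes it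
-- structurally total (the entering j is always enough fuel, since prefix[j-1] < j in every real run)
def pvWhile (pat : List Char) (pref : List Nat) (c : Char) : Nat → Nat → Nat
  | 0, j => j
  | fuel + 1, j =>
    if 0 < j ∧ pat.getD j ' ' ≠ c then pvWhile pat pref c fuel (pref.getD (j - 1) 0) else j

-- the `while …; if x == pattern[j]: j += 1` body shared verbatim by A's build_prefix and kmp_search
def pvStep (pat : List Char) (pref : List Nat) (c : Char) (j : Nat) : Nat :=
  let j' := pvWhile pat pref c j j
  if pat.getD j' ' ' = c then j' + 1 else j'

-- build_prefix: prefix = [0]*n; j = 0; for i in range(1, n): …; prefix[i] = j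
def buildPrefix (pat : List Char) : List Nat :=
  ((List.range' 1 (pat.length - 1)).foldl
    (fun (st : List Nat × Nat) i =>
      let j := pvStep pat st.1 (pat.getD i ' ') st.2
      (st.1.set i j, j))
    (List.replicate pat.length 0, 0)).1

-- kmp_search(text, pattern): state = (result, j)
def kmpSearch (text pat : List Char) : List Nat :=
  if pat = [] then []
  else
    let pref := buildPrefix pat
    ((List.range text.length).foldl
      (fun (st : List Nat × Nat) i =>
        let j := pvStep pat pref (text.getD i ' ') st.2
        if j = pat.length then (st.1 ++ [i + 1 - pat.length], pref.getD (j - 1) 0)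
        else (st.1, j))
      ([], 0)).1

def is_cyclic_shift (s : String) (t : String) : Int :=
  if s.toList.length ≠ t.toList.length then -1
  else if s = t then 0
  else
    let n := s.toList.length
    let positions := kmpSearch (s.toList ++ s.toList) t.toList
    if positions = [] then -1
    else ↑(positions.foldl (fun ms pos => if pos < n then min ms ((n - pos) % n) else ms) n)

-- ===== PORT B =====
def is_cyclic_shift_alt (s : String) (t : String) : Int :=
  if s.toList.length ≠ t.toList.length then -1
  else if s = t then 0
  else
    let ls := s.toList
    let n := ls.length
    match (List.range' 1 (n - 1)).find? (fun r => ls.drop (n - r) ++ ls.take (n - r) == t.toList) with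
    | some r => (r : Int)
    | none => -1

-- ===== PRECONDITION & SPEC =====
def Spec_is_cyclic_shift (s : String) (t : String) (out : Int) : Prop := out = is_cyclic_shift_alt s t
instance (s : String) (t : String) (out : Int) : Decidable (Spec_is_cyclic_shift s t out) := by unfold Spec_is_cyclic_shift; infer_instance

-- ===== CLAIM (what is proved, stated in full; the proofs are below) =====
def Claim_equal_is_cyclic_shift : Prop := ∀ (s : String) (t : String), Dom_is_cyclic_shift s t → Spec_is_cyclic_shift s t (is_cyclic_shift s t)

-- ===== LEMMAS AND PROOFS =====

-- Phi pat i = length of the longest proper border of pat.take (i+1): the value prefix[i]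
def Phi (pat : List Char) (i : Nat) : Nat :=
  Nat.findGreatest (fun k => pat.take k <:+ pat.take (i + 1)) i

theorem phi_le (pat : List Char) (i : Nat) : Phi pat i ≤ i := by
  unfold Phi; exact Nat.findGreatest_le i

theorem phi_spec (pat : List Char) (i : Nat) : pat.take (Phi pat i) <:+ pat.take (i + 1) :=
  by
  unfold Phi
  exact Nat.findGreatest_spec (P := fun k => pat.take k <:+ pat.take (i + 1))
    (Nat.zero_le i) (by simp)

theorem le_phi (pat : List Char) (i k : Nat) (h1 : k ≤ i)
    (h2 : pat.take k <:+ pat.take (i + 1)) : k ≤ Phi pat i :=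
  Nat.le_findGreatest h1 h2

-- take k l = take (k-1) l ++ [l[k-1]] for 1 ≤ k ≤ |l|
theorem take_eq_concat (l : List Char) (k : Nat) (h0 : 0 < k) (h1 : k ≤ l.length) :
    l.take k = l.take (k - 1) ++ [l.getD (k - 1) ' '] := by
  obtain ⟨k, rfl⟩ : ∃ k', k = k' + 1 := ⟨k - 1, by omega⟩
  simp only [Nat.add_sub_cancel]
  rw [List.take_add_one, List.getElem?_eq_getElem (by omega), List.getD_eq_getElem?_getD,
    List.getElem?_eq_getElem (by omega)]
  simp

theorem suffix_concat_iff (u w : List Char) (a c : Char) :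
    u ++ [a] <:+ w ++ [c] ↔ a = c ∧ u <:+ w := by
  rw [← List.reverse_prefix]
  simp only [List.reverse_append, List.reverse_cons, List.reverse_nil, List.nil_append,
    List.singleton_append]
  rw [List.cons_prefix_cons, List.reverse_prefix]

theorem pvWhile_spec (pat : List Char) (pref : List Nat) (c : Char) (w : List Char) :
    ∀ (fuel j : Nat), j ≤ fuel → j < pat.length → pat.take j <:+ w →
    (∀ k, k < j → pref.getD k 0 = Phi pat k) →
    pvWhile pat pref c fuel j ≤ j ∧
    pat.take (pvWhile pat pref c fuel j) <:+ w ∧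
    (pvWhile pat pref c fuel j = 0 ∨ pat.getD (pvWhile pat pref c fuel j) ' ' = c) ∧
    (∀ k, k ≤ j → pat.take k <:+ w → pat.getD k ' ' = c → k ≤ pvWhile pat pref c fuel j) := by
  intro fuel
  induction fuel with
  | zero =>
    intro j hj _ hsuf _
    interval_cases j
    exact ⟨Nat.le_refl _, by simpa [pvWhile] using hsuf, Or.inl (by simp [pvWhile]),
      fun k hk _ _ => by simpa [pvWhile] using hk⟩
  | succ fuel ih =>
    intro j hj hjm hsuf hpref
    by_cases h : 0 < j ∧ pat.getD j ' ' ≠ c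
    · have hres : pvWhile pat pref c (fuel + 1) j = pvWhile pat pref c fuel (pref.getD (j - 1) 0) := by
        rw [show pvWhile pat pref c (fuel + 1) j =
          if 0 < j ∧ pat.getD j ' ' ≠ c then pvWhile pat pref c fuel (pref.getD (j - 1) 0) else j
          from rfl, if_pos h]
      have hpe : pref.getD (j - 1) 0 = Phi pat (j - 1) := hpref (j - 1) (by omega)
      set j₂ := Phi pat (j - 1) with hj₂
      have hj₂le : j₂ ≤ j - 1 := phi_le pat (j - 1)
      have hj₂suf : pat.take j₂ <:+ pat.take j := by
        have := phi_spec pat (j - 1)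
        rwa [Nat.sub_add_cancel h.1] at this
      have hIH := ih j₂ (by omega) (by omega) (hj₂suf.trans hsuf)
        (fun k hk => hpref k (by omega))
      rw [hres, hpe]
      refine ⟨hIH.1.trans (by omega), hIH.2.1, hIH.2.2.1, ?_⟩
      intro k hk hksuf hkc
      rcases Nat.lt_or_ge k j with hkj | hkj
      · have hkcotake : pat.take k <:+ pat.take j :=
          List.suffix_of_suffix_length_le hksuf hsuf
            (by rw [List.length_take, List.length_take]; omega)
        have : k ≤ j₂ := le_phi pat (j - 1) k (by omega)
          (by rwa [Nat.sub_add_cancel h.1])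
        exact hIH.2.2.2 k this hksuf hkc
      · exfalso
        have : k = j := by omega
        exact h.2 (this ▸ hkc)
    · have hres : pvWhile pat pref c (fuel + 1) j = j := by
        rw [show pvWhile pat pref c (fuel + 1) j =
          if 0 < j ∧ pat.getD j ' ' ≠ c then pvWhile pat pref c fuel (pref.getD (j - 1) 0) else j
          from rfl, if_neg h]
      rw [hres]
      push_neg at h
      refine ⟨le_refl j, hsuf, ?_, fun k hk _ _ => hk⟩
      rcases Nat.eq_zero_or_pos j with h0 | h0
      · exact Or.inl h0
      · exact Or.inr (h h0)

theorem pvStep_spec (pat : List Char) (pref : List Nat) (c : Char) (w : List Char) (B j : Nat)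
    (hBm : B < pat.length) (hjB : j ≤ B) (hsuf : pat.take j <:+ w)
    (hmax : ∀ k, k ≤ B → pat.take k <:+ w → k ≤ j)
    (hpref : ∀ k, k < j → pref.getD k 0 = Phi pat k) :
    pvStep pat pref c j ≤ B + 1 ∧ pat.take (pvStep pat pref c j) <:+ (w ++ [c]) ∧
    (∀ k, k ≤ B + 1 → pat.take k <:+ (w ++ [c]) → k ≤ pvStep pat pref c j) := by
  obtain ⟨h1, h2, h3, h4⟩ := pvWhile_spec pat pref c w j j (le_refl j) (by omega) hsuf hpref
  set j' := pvWhile pat pref c j j with hj'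
  by_cases hc : pat.getD j' ' ' = c
  · have hres : pvStep pat pref c j = j' + 1 := by
      rw [show pvStep pat pref c j =
        if pat.getD (pvWhile pat pref c j j) ' ' = c then pvWhile pat pref c j j + 1
        else pvWhile pat pref c j j from rfl, ← hj', if_pos hc]
    rw [hres]
    refine ⟨by omega, ?_, ?_⟩
    · rw [take_eq_concat pat (j' + 1) (by omega) (by omega)]
      simp only [Nat.add_sub_cancel]
      rw [suffix_concat_iff]
      exact ⟨hc, h2⟩
    · intro k hk hksuf
      rcases Nat.eq_zero_or_pos k with h0 | h0
      · omega
      · rw [take_eq_concat pat k h0 (by omega), suffix_concat_iff] at hksuf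
        have hk1 : k - 1 ≤ j := hmax (k - 1) (by omega) hksuf.2
        have := h4 (k - 1) hk1 hksuf.2 hksuf.1
        omega
  · have hj0 : j' = 0 := h3.resolve_right hc
    have hres : pvStep pat pref c j = j' := by
      rw [show pvStep pat pref c j =
        if pat.getD (pvWhile pat pref c j j) ' ' = c then pvWhile pat pref c j j + 1
        else pvWhile pat pref c j j from rfl, ← hj', if_neg hc]
    rw [hres, hj0]
    refine ⟨by omega, by simp, ?_⟩
    intro k hk hksuf
    rcases Nat.eq_zero_or_pos k with h0 | h0
    · omega
    · exfalso
      rw [take_eq_concat pat k h0 (by omega), suffix_concat_iff] at hksuf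
      have hk1 : k - 1 ≤ j := hmax (k - 1) (by omega) hksuf.2
      have := h4 (k - 1) hk1 hksuf.2 hksuf.1
      have hk1' : k - 1 = 0 := by omega
      rw [hk1'] at hksuf
      rw [hj0] at hc
      exact hc hksuf.1

theorem buildPrefix_inv (pat : List Char) :
    ∀ i, i ≤ pat.length - 1 →
    (((List.range' 1 i).foldl
      (fun (st : List Nat × Nat) i =>
        let j := pvStep pat st.1 (pat.getD i ' ') st.2
        (st.1.set i j, j))
      (List.replicate pat.length 0, 0)).1.length = pat.length ∧
     (∀ k, k ≤ i → ((List.range' 1 i).foldl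
      (fun (st : List Nat × Nat) i =>
        let j := pvStep pat st.1 (pat.getD i ' ') st.2
        (st.1.set i j, j))
      (List.replicate pat.length 0, 0)).1.getD k 0 = Phi pat k) ∧
     ((List.range' 1 i).foldl
      (fun (st : List Nat × Nat) i =>
        let j := pvStep pat st.1 (pat.getD i ' ') st.2
        (st.1.set i j, j))
      (List.replicate pat.length 0, 0)).2 = Phi pat i) := by
  intro i
  induction i with
  | zero =>
    intro _
    refine ⟨by simp, ?_, by simp [Phi]⟩
    intro k hk
    interval_cases k
    simp [List.getD_eq_getElem?_getD, List.getElem?_replicate, Phi]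
    rcases Nat.eq_zero_or_pos pat.length with h | h
    · simp [h]
    · simp [h]
  | succ i ih =>
    intro hi
    have hm : i + 2 ≤ pat.length := by omega
    obtain ⟨hlen, hgetD, hj⟩ := ih (by omega)
    set st := ((List.range' 1 i).foldl
      (fun (st : List Nat × Nat) i =>
        let j := pvStep pat st.1 (pat.getD i ' ') st.2
        (st.1.set i j, j))
      (List.replicate pat.length 0, 0)) with hst
    have hunf : (List.range' 1 (i + 1)).foldl
      (fun (st : List Nat × Nat) i =>
        let j := pvStep pat st.1 (pat.getD i ' ') st.2
        (st.1.set i j, j))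
      (List.replicate pat.length 0, 0) =
      (st.1.set (i + 1) (pvStep pat st.1 (pat.getD (i + 1) ' ') st.2),
       pvStep pat st.1 (pat.getD (i + 1) ' ') st.2) := by
      rw [List.range'_concat, List.foldl_append, ← hst]
      have h11 : 1 + 1 * i = i + 1 := by omega
      rw [h11]
      simp only [List.foldl_cons, List.foldl_nil]
    have hstep := pvStep_spec pat st.1 (pat.getD (i + 1) ' ') (pat.take (i + 1)) i (Phi pat i)
      (by omega) (phi_le pat i) (phi_spec pat i)
      (fun k hk hsuf => le_phi pat i k hk hsuf)
      (fun k hk => hgetD k (by have := phi_le pat i; omega))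
    rw [← hj] at hstep
    have hconcat : pat.take (i + 1) ++ [pat.getD (i + 1) ' '] = pat.take (i + 2) := by
      rw [take_eq_concat pat (i + 2) (by omega) hm]
      simp
    rw [hconcat] at hstep
    have hphi : pvStep pat st.1 (pat.getD (i + 1) ' ') st.2 = Phi pat (i + 1) := by
      apply le_antisymm
      · exact le_phi pat (i + 1) _ hstep.1 hstep.2.1
      · exact hstep.2.2 (Phi pat (i + 1)) (by have := phi_le pat (i + 1); omega) (phi_spec pat (i + 1))
    rw [hunf]
    refine ⟨by simpa using hlen, ?_, by simpa using hphi⟩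
    intro k hk
    rcases Nat.eq_or_lt_of_le hk with he | hlt
    · subst he
      simp only [List.getD_eq_getElem?_getD]
      rw [List.getElem?_set_self (by omega)]
      simpa using hphi
    · simp only [List.getD_eq_getElem?_getD]
      rw [List.getElem?_set_ne (by omega)]
      rw [← List.getD_eq_getElem?_getD]
      exact hgetD k (by omega)

theorem buildPrefix_getD (pat : List Char) :
    ∀ k, k ≤ pat.length - 1 → (buildPrefix pat).getD k 0 = Phi pat k := by
  intro k hk
  exact (buildPrefix_inv pat (pat.length - 1) (le_refl _)).2.1 k hk

theorem kmp_inv (text pat : List Char) (hpat : pat ≠ []) :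
    ∀ e, e ≤ text.length →
    (((List.range e).foldl
      (fun (st : List Nat × Nat) i =>
        let j := pvStep pat (buildPrefix pat) (text.getD i ' ') st.2
        if j = pat.length then (st.1 ++ [i + 1 - pat.length], (buildPrefix pat).getD (j - 1) 0)
        else (st.1, j))
      ([], 0)).1 =
      (List.range e).filterMap
        (fun x => if pat <:+ text.take (x + 1) then some (x + 1 - pat.length) else none) ∧
     ((List.range e).foldl
      (fun (st : List Nat × Nat) i =>
        let j := pvStep pat (buildPrefix pat) (text.getD i ' ') st.2
        if j = pat.length then (st.1 ++ [i + 1 - pat.length], (buildPrefix pat).getD (j - 1) 0)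
        else (st.1, j))
      ([], 0)).2 ≤ pat.length - 1 ∧
     pat.take (((List.range e).foldl
      (fun (st : List Nat × Nat) i =>
        let j := pvStep pat (buildPrefix pat) (text.getD i ' ') st.2
        if j = pat.length then (st.1 ++ [i + 1 - pat.length], (buildPrefix pat).getD (j - 1) 0)
        else (st.1, j))
      ([], 0)).2) <:+ text.take e ∧
     (∀ k, k ≤ pat.length - 1 → pat.take k <:+ text.take e →
       k ≤ ((List.range e).foldl
      (fun (st : List Nat × Nat) i =>
        let j := pvStep pat (buildPrefix pat) (text.getD i ' ') st.2
        if j = pat.length then (st.1 ++ [i + 1 - pat.length], (buildPrefix pat).getD (j - 1) 0)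
        else (st.1, j))
      ([], 0)).2)) := by
  have hm : 1 ≤ pat.length := List.length_pos_iff.mpr hpat
  intro e
  induction e with
  | zero =>
    intro _
    refine ⟨by simp, by simp, by simp, ?_⟩
    intro k hk hsuf
    simp only [List.take_zero, List.suffix_nil] at hsuf
    have : (pat.take k).length = 0 := by rw [hsuf]; simp
    rw [List.length_take] at this
    simp
    omega
  | succ e ih =>
    intro he
    obtain ⟨hres, hj1, hj2, hj3⟩ := ih (by omega)
    set st := ((List.range e).foldl
      (fun (st : List Nat × Nat) i =>
        let j := pvStep pat (buildPrefix pat) (text.getD i ' ') st.2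
        if j = pat.length then (st.1 ++ [i + 1 - pat.length], (buildPrefix pat).getD (j - 1) 0)
        else (st.1, j))
      ([], 0)) with hst
    set j₀ := pvStep pat (buildPrefix pat) (text.getD e ' ') st.2 with hj₀
    have hunf : (List.range (e + 1)).foldl
      (fun (st : List Nat × Nat) i =>
        let j := pvStep pat (buildPrefix pat) (text.getD i ' ') st.2
        if j = pat.length then (st.1 ++ [i + 1 - pat.length], (buildPrefix pat).getD (j - 1) 0)
        else (st.1, j)) ([], 0) =
      (if j₀ = pat.length then (st.1 ++ [e + 1 - pat.length], (buildPrefix pat).getD (j₀ - 1) 0)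
       else (st.1, j₀)) := by
      rw [List.range_succ, List.foldl_append, ← hst]
      simp only [List.foldl_cons, List.foldl_nil]
      rw [← hj₀]
    have htake : text.take (e + 1) = text.take e ++ [text.getD e ' '] :=
      by simpa using take_eq_concat text (e + 1) (by omega) (by omega)
    have hstep := pvStep_spec pat (buildPrefix pat) (text.getD e ' ') (text.take e)
      (pat.length - 1) st.2 (by omega) hj1 hj2 hj3
      (fun k hk => buildPrefix_getD pat k (by omega))
    rw [← hj₀, Nat.sub_add_cancel hm, ← htake] at hstep
    by_cases hj : j₀ = pat.length
    · have hocc : pat <:+ text.take (e + 1) := by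
        have h2 := hstep.2.1
        rwa [hj, List.take_length] at h2
      have hnew : (buildPrefix pat).getD (j₀ - 1) 0 = Phi pat (pat.length - 1) := by
        rw [hj]; exact buildPrefix_getD pat (pat.length - 1) (le_refl _)
      have hfm : (List.range (e + 1)).filterMap
          (fun x => if pat <:+ text.take (x + 1) then some (x + 1 - pat.length) else none) =
          (List.range e).filterMap
          (fun x => if pat <:+ text.take (x + 1) then some (x + 1 - pat.length) else none)
          ++ [e + 1 - pat.length] := by
        rw [List.range_succ, List.filterMap_append]
        simp [hocc]
      rw [hunf, if_pos hj]
      refine ⟨by rw [hfm, hres], ?_, ?_, ?_⟩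
      · show (buildPrefix pat).getD (j₀ - 1) 0 ≤ pat.length - 1
        rw [hnew]
        exact phi_le pat (pat.length - 1)
      · simp only [hnew]
        have := phi_spec pat (pat.length - 1)
        rw [Nat.sub_add_cancel hm, List.take_length] at this
        exact this.trans hocc
      · intro k hk hksuf
        simp only [hnew]
        have hkpat : pat.take k <:+ pat :=
          List.suffix_of_suffix_length_le hksuf hocc (by rw [List.length_take]; omega)
        exact le_phi pat (pat.length - 1) k hk
          (by rwa [Nat.sub_add_cancel hm, List.take_length])
    · have hnocc : ¬ (pat <:+ text.take (e + 1)) := by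
        intro h
        have := hstep.2.2 pat.length (le_refl _) (by rwa [List.take_length])
        omega
      have hfm : (List.range (e + 1)).filterMap
          (fun x => if pat <:+ text.take (x + 1) then some (x + 1 - pat.length) else none) =
          (List.range e).filterMap
          (fun x => if pat <:+ text.take (x + 1) then some (x + 1 - pat.length) else none) := by
        rw [List.range_succ, List.filterMap_append]
        simp [hnocc]
      rw [hunf, if_neg hj]
      refine ⟨by rw [hfm, hres], by omega, hstep.2.1, ?_⟩
      intro k hk hksuf
      exact hstep.2.2 k (by omega) hksuf

theorem kmpSearch_eq (text pat : List Char) (hpat : pat ≠ []) :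
    kmpSearch text pat =
      (List.range text.length).filterMap
        (fun x => if pat <:+ text.take (x + 1) then some (x + 1 - pat.length) else none) := by
  unfold kmpSearch
  rw [if_neg hpat]
  exact (kmp_inv text pat hpat text.length (le_refl _)).1

-- occurrence of t at offset p + n - 1 in s++s, phrased as a rotation equality
theorem occ_iff_rot (sl tl : List Char) (p : Nat) (hp : p ≤ sl.length)
    (hlen : tl.length = sl.length) :
    (tl <:+ (sl ++ sl).take (p + sl.length)) ↔ (sl.drop p ++ sl.take p = tl) := by
  set n := sl.length with hn
  have hlds : ((sl ++ sl).take (p + n)).length = p + n := by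
    rw [List.length_take, List.length_append]
    omega
  rw [List.suffix_iff_eq_drop, hlds, hlen]
  have h1 : p + n - n = p := by omega
  rw [h1, List.drop_take]
  have h2 : p + n - p = n := by omega
  rw [h2, List.drop_append_of_le_length hp]
  have h3 : (sl.drop p).length = n - p := by rw [List.length_drop]
  have h4 : List.take n (sl.drop p ++ sl) = sl.drop p ++ sl.take p := by
    rw [List.take_append, h3, List.take_of_length_le (by omega)]
    congr 1
    congr 1
    omega
  rw [h4, eq_comm]

theorem filterMap_ite_eq_filter (pred : Nat → Bool) (l : List Nat) :
    l.filterMap (fun q => if pred q then some q else none) = l.filter pred := by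
  induction l with
  | nil => simp
  | cons a l ih =>
    by_cases h : pred a
    · simp [List.filterMap_cons, List.filter_cons, h, ih]
    · simp [List.filterMap_cons, List.filter_cons, h, ih]

theorem occList_eq_rotFilter (sl tl : List Char) (hn : 0 < sl.length)
    (hlen : tl.length = sl.length) :
    (List.range ((sl ++ sl).length)).filterMap
      (fun x => if tl <:+ (sl ++ sl).take (x + 1) then some (x + 1 - tl.length) else none) =
    (List.range (sl.length + 1)).filter (fun p => sl.drop p ++ sl.take p == tl) := by
  set n := sl.length with hn'
  have hds : (sl ++ sl).length = n + n := by rw [List.length_append]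
  have hsplit : List.range (n + n) = List.range' 0 (n - 1) ++ List.range' (n - 1) (n + 1) := by
    rw [List.range_eq_range']
    rw [show n + n = (n - 1) + (n + 1) by omega]
    rw [← List.range'_append]
    congr 2
    omega
  rw [hds, hsplit, List.filterMap_append]
  have hnil : (List.range' 0 (n - 1)).filterMap
      (fun x => if tl <:+ (sl ++ sl).take (x + 1) then some (x + 1 - tl.length) else none) = [] := by
    rw [List.filterMap_eq_nil_iff]
    intro x hx
    rw [List.mem_range'_1] at hx
    rw [if_neg]
    intro hsuf
    have := hsuf.length_le
    rw [hlen, List.length_take, List.length_append] at this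
    omega
  rw [hnil, List.nil_append]
  have hmap : List.range' (n - 1) (n + 1) =
      (List.range (n + 1)).map (fun x => (n - 1) + x) := by
    rw [List.range_eq_range', List.map_add_range']
    simp
  rw [hmap, List.filterMap_map]
  have hcongr : ∀ x ∈ List.range (n + 1),
      ((fun x => if tl <:+ (sl ++ sl).take (x + 1) then some (x + 1 - tl.length) else none) ∘
        (fun x => (n - 1) + x)) x =
      (fun q => if (sl.drop q ++ sl.take q == tl) then some q else none) x := by
    intro x hx
    rw [List.mem_range] at hx
    have hx' : x ≤ n := by omega
    have harg : (n - 1) + x + 1 = x + n := by omega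
    simp only [Function.comp_apply, harg]
    have hocc := occ_iff_rot sl tl x hx' hlen
    by_cases h : sl.drop x ++ sl.take x = tl
    · rw [if_pos (hocc.mpr h), if_pos (by rwa [beq_iff_eq])]
      congr 1
      rw [hlen]
      omega
    · rw [if_neg (fun hc => h (hocc.mp hc)), if_neg (by simpa [beq_iff_eq] using h)]
  rw [List.filterMap_congr hcongr, filterMap_ite_eq_filter]

theorem rotFilter_trim (sl tl : List Char) (hn : 0 < sl.length) (hne : sl ≠ tl) :
    (List.range (sl.length + 1)).filter (fun p => sl.drop p ++ sl.take p == tl) =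
    (List.range' 1 (sl.length - 1)).filter (fun p => sl.drop p ++ sl.take p == tl) := by
  set n := sl.length with hn'
  have h0 : List.range (n + 1) = 0 :: (List.range' 1 (n - 1) ++ [n]) := by
    rw [List.range_eq_range', List.range'_succ]
    congr 1
    rw [show (n : Nat) = (n - 1) + 1 by omega, List.range'_concat]
    congr 2
    omega
  rw [h0, List.filter_cons, List.filter_append]
  have hz : (sl.drop 0 ++ sl.take 0 == tl) = false := by
    simp only [List.drop_zero, List.take_zero, List.append_nil]
    exact beq_eq_false_iff_ne.mpr hne
  have hl : (sl.drop n ++ sl.take n == tl) = false := by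
    rw [hn', List.drop_length, List.take_length, List.nil_append]
    exact beq_eq_false_iff_ne.mpr hne
  simp [hz, hl]
  exact hne

theorem foldl_min_getLast (n : Nat) :
    ∀ (P : List Nat) (acc : Nat), P.Pairwise (· < ·) →
    P.foldl (fun ms pos => min ms (n - pos)) acc =
      (match P.getLast? with | none => acc | some p => min acc (n - p)) := by
  intro P
  induction P with
  | nil => intro acc _; simp
  | cons a P ih =>
    intro acc hpw
    rw [List.pairwise_cons] at hpw
    rw [List.foldl_cons, ih (min acc (n - a)) hpw.2]
    cases hP : P.getLast? with
    | none =>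
      rw [List.getLast?_eq_none_iff] at hP
      subst hP
      simp
    | some p =>
      have hmem : p ∈ P := List.mem_of_getLast? hP
      have hap : a < p := hpw.1 p hmem
      have : min (n - a) (n - p) = n - p := by
        apply min_eq_right
        omega
      rw [List.getLast?_cons, hP]
      simp only [Option.getD_some, min_assoc, this]

theorem find?_eq_head?_filter' {α : Type} (p : α → Bool) (l : List α) :
    l.find? p = (l.filter p).head? := by
  induction l with
  | nil => simp
  | cons a l ih =>
    rw [List.find?_cons, List.filter_cons]
    cases hpa : p a
    · simpa using ih
    · simp

theorem map_sub_range' (n : Nat) (hn : 0 < n) :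
    (List.range' 1 (n - 1)).map (fun r => n - r) = (List.range' 1 (n - 1)).reverse := by
  rw [List.reverse_range']
  rw [show List.range' 1 (n - 1) = (List.range (n - 1)).map (fun x => 1 + x) by
    rw [List.range_eq_range', List.map_add_range']]
  rw [List.map_map]
  apply List.map_congr_left
  intro x hx
  rw [List.mem_range] at hx
  simp only [Function.comp_apply]
  omega


theorem foldl_guard_eq (n : Nat) :
    ∀ (P : List Nat), (∀ p ∈ P, 1 ≤ p ∧ p < n) →
    ∀ acc, P.foldl (fun ms pos => if pos < n then min ms ((n - pos) % n) else ms) acc =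
      P.foldl (fun ms pos => min ms (n - pos)) acc := by
  intro P
  induction P with
  | nil => intro _ acc; rfl
  | cons a P ih =>
    intro h acc
    have ha := h a (by simp)
    rw [List.foldl_cons, List.foldl_cons, if_pos ha.2, Nat.mod_eq_of_lt (by omega)]
    exact ih (fun p hp => h p (List.mem_cons_of_mem _ hp)) _

theorem is_cyclic_shift_eq_alt (s t : String) :
    is_cyclic_shift s t = is_cyclic_shift_alt s t := by
  unfold is_cyclic_shift is_cyclic_shift_alt
  by_cases h1 : s.toList.length ≠ t.toList.length
  · rw [if_pos h1, if_pos h1]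
  · rw [if_neg h1, if_neg h1]
    by_cases h2 : s = t
    · rw [if_pos h2, if_pos h2]
    · rw [if_neg h2, if_neg h2]
      show (if kmpSearch (s.toList ++ s.toList) t.toList = [] then (-1 : Int)
        else ↑((kmpSearch (s.toList ++ s.toList) t.toList).foldl
          (fun ms pos => if pos < s.toList.length then
            min ms ((s.toList.length - pos) % s.toList.length) else ms) s.toList.length)) =
        (match (List.range' 1 (s.toList.length - 1)).find?
          (fun r => s.toList.drop (s.toList.length - r) ++ s.toList.take (s.toList.length - r) == t.toList) with
        | some r => (r : Int)
        | none => -1)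
      have hlen : t.toList.length = s.toList.length := (not_ne_iff.mp h1).symm
      have hne : s.toList ≠ t.toList := fun h => h2 (String.toList_inj.mp h)
      have hn : 0 < s.toList.length := by
        rcases Nat.eq_zero_or_pos s.toList.length with h0 | h0
        · exact absurd (by rw [List.length_eq_zero_iff.mp h0,
            List.length_eq_zero_iff.mp (by omega : t.toList.length = 0)]) hne
        · exact h0
      have htl : t.toList ≠ [] := by
        intro h
        have h0 : t.toList.length = 0 := by rw [h]; rfl
        omega
      have hkmp : kmpSearch (s.toList ++ s.toList) t.toList =
          (List.range' 1 (s.toList.length - 1)).filter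
            (fun p => s.toList.drop p ++ s.toList.take p == t.toList) := by
        rw [kmpSearch_eq _ _ htl]
        rw [show (s.toList ++ s.toList).length = (s.toList ++ s.toList).length from rfl]
        rw [occList_eq_rotFilter s.toList t.toList hn hlen,
          rotFilter_trim s.toList t.toList hn hne]
      have hkey : Option.map (fun r => s.toList.length - r)
          ((List.range' 1 (s.toList.length - 1)).find?
            (fun r => s.toList.drop (s.toList.length - r) ++ s.toList.take (s.toList.length - r) == t.toList)) =
          ((List.range' 1 (s.toList.length - 1)).filter
            (fun p => s.toList.drop p ++ s.toList.take p == t.toList)).getLast? := by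
        rw [show (fun r => s.toList.drop (s.toList.length - r) ++ s.toList.take (s.toList.length - r) == t.toList)
            = ((fun p => s.toList.drop p ++ s.toList.take p == t.toList) ∘ (fun r => s.toList.length - r)) from rfl]
        rw [← List.find?_map, map_sub_range' _ hn, find?_eq_head?_filter',
          List.filter_reverse, List.head?_reverse]
      cases hf : (List.range' 1 (s.toList.length - 1)).find?
          (fun r => s.toList.drop (s.toList.length - r) ++ s.toList.take (s.toList.length - r) == t.toList) with
      | none =>
        rw [hf] at hkey
        have hPnil : (List.range' 1 (s.toList.length - 1)).filter
            (fun p => s.toList.drop p ++ s.toList.take p == t.toList) = [] :=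
          List.getLast?_eq_none_iff.mp hkey.symm
        rw [hkmp, hPnil]
        simp
      | some r =>
        rw [hf] at hkey
        simp only [Option.map_some] at hkey
        have hrmem : r ∈ List.range' 1 (s.toList.length - 1) := List.mem_of_find?_eq_some hf
        rw [List.mem_range'_1] at hrmem
        have hPne : (List.range' 1 (s.toList.length - 1)).filter
            (fun p => s.toList.drop p ++ s.toList.take p == t.toList) ≠ [] := by
          intro h
          rw [h] at hkey
          simp at hkey
        rw [hkmp, if_neg hPne]
        have hmem : ∀ p ∈ (List.range' 1 (s.toList.length - 1)).filter
            (fun p => s.toList.drop p ++ s.toList.take p == t.toList), 1 ≤ p ∧ p < s.toList.length := by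
          intro p hp
          rw [List.mem_filter, List.mem_range'_1] at hp
          omega
        rw [foldl_guard_eq _ _ hmem,
          foldl_min_getLast s.toList.length _ _ (List.Pairwise.filter _ (List.pairwise_lt_range' 1)),
          ← hkey]
        have h5 : s.toList.length - (s.toList.length - r) = r := by omega
        show (↑(min s.toList.length (s.toList.length - (s.toList.length - r))) : Int) = ↑r
        rw [h5, min_eq_right (by omega : r ≤ s.toList.length)]


-- ===== VERDICT (by name: the statement is the Claim_ definition above) =====
theorem is_cyclic_shift_spec : Claim_equal_is_cyclic_shift := by
  intro s t _
  unfold Spec_is_cyclic_shift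
  exact is_cyclic_shift_eq_alt s t
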